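-- pv_equiv track=rewrite | github.com/jjhsnail0822/sound-symbolism | dataset/4_codes/fr_ipa_filter.py | find_same_pronunciations
-- ===== SOURCE A (Python) =====
-- from collections import defaultdict
--
-- def find_same_pronunciations(data):
--     """Find words with the same IPA pronunciation"""
--     # Group words by IPA
--     ipa_groups = defaultdict(list)
--     for i, item in enumerate(data):
--         ipa = item.get('ipa', '').strip()
--         if ipa:  # Only consider items with IPA
--             ipa_groups[ipa].append((i, item))
--
--     # Filter groups with more than one word
--     same_pronunciations = {ipa: items for ipa, items in ipa_groups.items() if len(items) > 1}
--
--     return same_pronunciations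
-- ===== SOURCE B (Python) =====
-- def find_same_pronunciations(data):
--     """Find words with the same IPA pronunciation"""
--     # Distinct non-empty IPA keys, in first-occurrence order
--     keys = list(dict.fromkeys(
--         k for item in data if (k := item.get('ipa', '').strip())))
--     result = {}
--     for k in keys:
--         group = [(i, item) for i, item in enumerate(data)
--                  if item.get('ipa', '').strip() == k]
--         if len(group) > 1:
--             result[k] = group
--     return result
-- ===== Notes on version B (the rewrite author's own statement) =====
-- stated objective: alternative
-- what changed: Replaces the defaultdict hash-grouping single pass by first computing the ordered list of distinct non-empty IPA keys (dict.fromkeys) and then rescanning the whole list once per key to materialise each group.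
import Mathlib
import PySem

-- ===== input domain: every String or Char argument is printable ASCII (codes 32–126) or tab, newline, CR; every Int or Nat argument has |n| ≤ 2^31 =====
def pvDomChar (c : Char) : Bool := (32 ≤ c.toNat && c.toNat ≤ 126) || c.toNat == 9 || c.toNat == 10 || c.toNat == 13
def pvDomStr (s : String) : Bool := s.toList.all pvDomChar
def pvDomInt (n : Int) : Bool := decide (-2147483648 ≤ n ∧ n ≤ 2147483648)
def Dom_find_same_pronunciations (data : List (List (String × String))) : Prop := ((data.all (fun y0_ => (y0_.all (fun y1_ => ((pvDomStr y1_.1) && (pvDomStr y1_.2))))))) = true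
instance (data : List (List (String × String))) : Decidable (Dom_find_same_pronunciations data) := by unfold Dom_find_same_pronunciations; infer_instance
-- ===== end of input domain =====

-- B replaces A's defaultdict hash-grouping pass by an ordered distinct-key pass plus one full
-- scan per key (alternative decomposition; same return value, not claimed faster).

-- item.get('ipa', '').strip()  (shared by both ports)
def fsKey (item : List (String × String)) : String :=
  PySem.Str.strip ((PySem.Dict.mk item).getD "ipa" "")

-- ===== PORT A =====
def find_same_pronunciations (data : List (List (String × String))) :
    List (String × List (Int × (List (String × String)))) :=
  let ipa_groups :=
    (PySem.List.enumerate data).foldl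
      (fun g p =>
        let ipa := fsKey p.2
        if ipa ≠ "" then g.modify ipa [] (· ++ [p]) else g)
      PySem.Dict.empty
  -- the dict comprehension rebuilds a dict from the (unique-key) items kept by the condition;
  -- on an association list with unique keys that is the filter of the items list
  ipa_groups.items.filter (fun kv => 1 < kv.2.length)

-- ===== PORT B =====
def find_same_pronunciations_alt (data : List (List (String × String))) :
    List (String × List (Int × (List (String × String)))) :=
  let keys := PySem.List.dedup (data.filterMap (fun item =>
    let k := fsKey item
    if k ≠ "" then some k else none))
  keys.foldl
    (fun r k =>
      let group := (PySem.List.enumerate data).filter (fun p => fsKey p.2 == k)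
      if 1 < group.length then r ++ [(k, group)] else r)
    []

-- ===== PRECONDITION & SPEC =====
def Spec_find_same_pronunciations (data : List (List (String × String))) (out : List (String × List (Int × (List (String × String))))) : Prop := out = find_same_pronunciations_alt data
instance (data : List (List (String × String))) (out : List (String × List (Int × (List (String × String))))) : Decidable (Spec_find_same_pronunciations data out) := by unfold Spec_find_same_pronunciations; infer_instance

-- ===== CLAIM (what is proved, stated in full; the proofs are below) =====
def Claim_equal_find_same_pronunciations : Prop := ∀ (data : List (List (String × String))), Dom_find_same_pronunciations data → Spec_find_same_pronunciations data (find_same_pronunciations data)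

-- ===== LEMMAS AND PROOFS =====

-- A's fold with the emptiness guard = the unguarded fold over the filtered list
theorem guard_fold (l : List (Int × List (String × String)))
    (d : PySem.Dict String (List (Int × List (String × String)))) :
    l.foldl (fun g p => let ipa := fsKey p.2; if ipa ≠ "" then g.modify ipa [] (· ++ [p]) else g) d
      = (l.filter (fun p => fsKey p.2 != "")).foldl
          (fun g p => g.modify (fsKey p.2) [] (· ++ [p])) d := by
  rw [List.foldl_filter]
  congr 1
  funext g p
  by_cases h : fsKey p.2 = "" <;> simp [h]

-- the value stored under k by A's grouping fold
theorem groups_getD (l : List (Int × List (String × String)))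
    (d : PySem.Dict String (List (Int × List (String × String)))) (k : String) :
    (l.foldl (fun g p => g.modify (fsKey p.2) [] (· ++ [p])) d).getD k [] =
      d.getD k [] ++ l.filter (fun p => fsKey p.2 == k) := by
  induction l generalizing d with
  | nil => simp
  | cons p t ih =>
    by_cases h : fsKey p.2 = k
    · simp [h, ih]
    · simp [h, ih, PySem.Dict.getD_modify, Ne.symm h]

-- B's key list read off the enumerated pairs
theorem keys_enum_eq (data : List (List (String × String))) (s : Int) :
    ((PySem.List.enumerate data s).filter (fun p => fsKey p.2 != "")).map (fun p => fsKey p.2)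
      = data.filterMap (fun item => let k := fsKey item; if k ≠ "" then some k else none) := by
  induction data generalizing s with
  | nil => rfl
  | cons it t ih =>
    by_cases h : fsKey it = ""
    · simp [PySem.List.enumerate_cons, h, ih]
    · simp [PySem.List.enumerate_cons, h, ih]

-- B's appending loop = filter-then-map over the key list
theorem foldB (ks : List String) (e : List (Int × List (String × String)))
    (r0 : List (String × List (Int × (List (String × String))))) :
    ks.foldl
      (fun r k =>
        if 1 < (e.filter (fun p => fsKey p.2 == k)).length then
          r ++ [(k, e.filter (fun p => fsKey p.2 == k))]
        else r) r0
    = r0 ++ (ks.filter (fun k => 1 < (e.filter (fun p => fsKey p.2 == k)).length)).map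
        (fun k => (k, e.filter (fun p => fsKey p.2 == k))) := by
  induction ks generalizing r0 with
  | nil => simp
  | cons k t ih =>
    by_cases h : 1 < (e.filter (fun p => fsKey p.2 == k)).length
    · simp [h, ih]
    · simp [h, ih]

theorem main_eq (data : List (List (String × String))) :
    find_same_pronunciations data = find_same_pronunciations_alt data := by
  unfold find_same_pronunciations find_same_pronunciations_alt
  rw [guard_fold]
  set e := PySem.List.enumerate data with he
  set l' := e.filter (fun p => fsKey p.2 != "") with hl'
  set K := l'.map (fun p => fsKey p.2) with hK
  set G := l'.foldl (fun g p => g.modify (fsKey p.2) [] (· ++ [p])) PySem.Dict.empty with hG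
  have hnd : G.keys.Nodup := by
    rw [hG]
    exact PySem.Dict.nodup_keys_foldl_modify_key l' (fun p => fsKey p.2) []
      (fun g p => (· ++ [p])) PySem.Dict.empty (by simp)
  have hkeys : G.keys = PySem.Set.ofList K := by
    rw [hG, PySem.Dict.keys_foldl_modify_key]
    simp only [PySem.Set.update, PySem.Set.ofList_eq_foldl, PySem.Dict.keys_empty]
    rfl
  have hitems : G.items = (PySem.Set.ofList K).map
      (fun k => (k, l'.filter (fun p => fsKey p.2 == k))) := by
    rw [PySem.Dict.items_eq_map_keys G hnd [], hkeys]
    refine List.map_congr_left (fun k _ => ?_)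
    rw [hG, groups_getD]; simp
  have hkeysB : PySem.List.dedup (data.filterMap (fun item =>
      let k := fsKey item
      if k ≠ "" then some k else none)) = PySem.Set.ofList K := by
    rw [← keys_enum_eq data 0, PySem.List.dedup_eq_ofList]
  have hfix : ∀ k : String, k ≠ "" →
      l'.filter (fun p => fsKey p.2 == k) = e.filter (fun p => fsKey p.2 == k) := by
    intro k hk
    rw [hl', List.filter_filter]
    congr 1
    funext p
    by_cases h : fsKey p.2 = k
    · simp [h, hk]
    · simp [h]
  have hmemne : ∀ k ∈ PySem.Set.ofList K, k ≠ "" := by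
    intro k hkmem
    have : k ∈ K := (PySem.Set.mem_ofList _ _).1 hkmem
    rw [hK] at this
    obtain ⟨p, hp, rfl⟩ := List.mem_map.1 this
    have := List.of_mem_filter hp
    simpa using this
  simp only [hkeysB, hitems]
  rw [List.filter_map, foldB]
  simp only [List.nil_append]
  have h1 : (PySem.Set.ofList K).filter
        ((fun kv : String × List (Int × List (String × String)) => decide (1 < kv.2.length)) ∘
          (fun k => (k, l'.filter (fun p => fsKey p.2 == k))))
      = (PySem.Set.ofList K).filter
          (fun k => decide (1 < (e.filter (fun p => fsKey p.2 == k)).length)) :=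
    List.filter_congr (fun k hk => by
      simp only [Function.comp_apply]
      rw [hfix k (hmemne k hk)])
  rw [h1]
  refine List.map_congr_left (fun k hk => ?_)
  rw [hfix k (hmemne k (List.mem_of_mem_filter hk))]

-- ===== VERDICT (by name: the statement is the Claim_ definition above) =====
theorem find_same_pronunciations_spec : Claim_equal_find_same_pronunciations := by
  intro data _
  unfold Spec_find_same_pronunciations
  exact main_eq data
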